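-- pv_equiv track=rewrite | github.com/jyotiarora92/Agoda | ChangePassword draft 1.py | checkSimilarity
-- ===== SOURCE A (Python) =====
-- import math
--
-- def checkSimilarity(oldPassword, newPassword):
--     if oldPassword == newPassword:
--         return False
--     charDictOld = {}
--     for i in oldPassword:
--         if i in charDictOld:
--             charDictOld[i]+=1
--         else:
--             charDictOld[i]=1
--     charDictNew = {}
--     for i in newPassword:
--         if i in charDictNew:
--             charDictNew[i]+=1
--         else:
--             charDictNew[i]=1
--     similarCount = 0
--     for i in charDictOld.keys():
--         if i in charDictNew:
--             similarCount += charDictOld[i] if charDictOld[i]<charDictNew[i] else charDictNew[i]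
--     if math.ceil(len(oldPassword)*4/5)<= similarCount:
--         return False
--     return True
-- ===== SOURCE B (Python) =====
-- import math
--
-- def checkSimilarity(oldPassword, newPassword):
--     if oldPassword == newPassword:
--         return False
--     remaining = {}
--     for ch in oldPassword:
--         remaining[ch] = remaining.get(ch, 0) + 1
--     similarCount = 0
--     for ch in newPassword:
--         if remaining.get(ch, 0) > 0:
--             remaining[ch] -= 1
--             similarCount += 1
--     if math.ceil(len(oldPassword)*4/5) <= similarCount:
--         return False
--     return True
-- ===== Notes on version B (the rewrite author's own statement) =====
-- stated objective: simpler
-- what changed: Replaced A's two full character-count dicts plus a loop over the old dict's keys summing minima with a single count dict of oldPassword that is consumed in one pass over newPassword (decrement-and-count), yielding the same multiset-intersection count.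
import Mathlib
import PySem

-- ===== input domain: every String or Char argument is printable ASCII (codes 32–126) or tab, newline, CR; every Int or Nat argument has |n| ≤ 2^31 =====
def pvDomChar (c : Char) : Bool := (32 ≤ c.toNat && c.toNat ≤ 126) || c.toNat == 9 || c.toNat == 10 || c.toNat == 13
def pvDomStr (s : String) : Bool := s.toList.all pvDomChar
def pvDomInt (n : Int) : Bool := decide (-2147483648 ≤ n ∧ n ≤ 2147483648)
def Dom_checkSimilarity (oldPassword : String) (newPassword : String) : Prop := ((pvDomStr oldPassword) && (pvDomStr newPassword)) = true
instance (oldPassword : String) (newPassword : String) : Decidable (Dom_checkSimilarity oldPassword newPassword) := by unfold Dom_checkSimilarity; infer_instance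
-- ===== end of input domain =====

-- B replaces A's two character-count dicts plus a key-intersection loop by one dict that is
-- consumed in a single pass over newPassword (objective: simpler decomposition, same result).

-- math.ceil(len(oldPassword)*4/5) ported exactly as the integer ceiling (4*n+4)/5 (the float
-- computation is exact for these lengths).

-- ===== PORT A =====
def checkSimilarity (oldPassword : String) (newPassword : String) : Bool :=
  if oldPassword == newPassword then false
  else
    let charDictOld : PySem.Dict Char Int :=
      oldPassword.toList.foldl
        (fun d i => if d.contains i then d.insert i (d.getD i 0 + 1) else d.insert i 1)
        PySem.Dict.empty
    let charDictNew : PySem.Dict Char Int :=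
      newPassword.toList.foldl
        (fun d i => if d.contains i then d.insert i (d.getD i 0 + 1) else d.insert i 1)
        PySem.Dict.empty
    let similarCount : Int :=
      charDictOld.keys.foldl
        (fun acc i =>
          if charDictNew.contains i then
            acc + (if charDictOld.getD i 0 < charDictNew.getD i 0 then charDictOld.getD i 0
                   else charDictNew.getD i 0)
          else acc)
        0
    if (((4 * oldPassword.toList.length + 4) / 5 : Nat) : Int) ≤ similarCount then false
    else true

-- ===== PORT B =====
def checkSimilarity_alt (oldPassword : String) (newPassword : String) : Bool :=
  if oldPassword == newPassword then false
  else
    let remaining : PySem.Dict Char Int :=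
      oldPassword.toList.foldl (fun d ch => d.insert ch (d.getD ch 0 + 1)) PySem.Dict.empty
    let st : PySem.Dict Char Int × Int :=
      newPassword.toList.foldl
        (fun (s : PySem.Dict Char Int × Int) ch =>
          if s.1.getD ch 0 > 0 then (s.1.modify ch 0 (· - 1), s.2 + 1) else s)
        (remaining, 0)
    if (((4 * oldPassword.toList.length + 4) / 5 : Nat) : Int) ≤ st.2 then false
    else true

-- ===== PRECONDITION & SPEC =====
def Spec_checkSimilarity (oldPassword : String) (newPassword : String) (out : Bool) : Prop := out = checkSimilarity_alt oldPassword newPassword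
instance (oldPassword : String) (newPassword : String) (out : Bool) : Decidable (Spec_checkSimilarity oldPassword newPassword out) := by unfold Spec_checkSimilarity; infer_instance

-- ===== CLAIM (what is proved, stated in full; the proofs are below) =====
def Claim_equal_checkSimilarity : Prop := ∀ (oldPassword : String) (newPassword : String), Dom_checkSimilarity oldPassword newPassword → Spec_checkSimilarity oldPassword newPassword (checkSimilarity oldPassword newPassword)

-- ===== LEMMAS AND PROOFS =====

-- A's two-branch counting step is the unconditional insert step.
lemma buildStep_eq :
    (fun (d : PySem.Dict Char Int) i =>
        if d.contains i then d.insert i (d.getD i 0 + 1) else d.insert i 1)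
      = fun d i => d.insert i (d.getD i 0 + 1) := by
  funext d i
  by_cases h : d.contains i = true
  · simp [h]
  · have h0 : d.getD i 0 = (0 : Int) :=
      PySem.Dict.getD_of_not_contains d 0 (by simpa using h)
    simp [h, h0]

-- card of a multiset intersection as a sum of min-counts over the left support.
lemma card_inter_eq_sum (s t : Multiset Char) :
    Multiset.card (s ∩ t) = ∑ a ∈ s.toFinset, min (s.count a) (t.count a) := by
  have h1 : ∑ a ∈ s.toFinset, min (s.count a) (t.count a)
      = ∑ a ∈ s.toFinset, (s ∩ t).count a := by
    refine Finset.sum_congr rfl (fun a _ => ?_)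
    rw [Multiset.count_inter]
  rw [h1, ← Multiset.toFinset_sum_count_eq (s ∩ t)]
  refine Finset.sum_subset ?_ ?_
  · intro a ha
    rw [Multiset.toFinset_inter] at ha
    exact Finset.mem_inter.mp ha |>.1
  · intro a _ ha
    exact Multiset.count_eq_zero_of_notMem (by simpa using ha)

-- A's key-intersection sum computes the multiset-intersection cardinality.
lemma a_sum_eq (m l : List Char) :
    (PySem.Dict.counter m).keys.foldl
      (fun acc i =>
        if (PySem.Dict.counter l).contains i then
          acc + (if (PySem.Dict.counter m).getD i 0 < (PySem.Dict.counter l).getD i 0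
                 then (PySem.Dict.counter m).getD i 0 else (PySem.Dict.counter l).getD i 0)
        else acc)
      0
    = (Multiset.card ((↑m : Multiset Char) ∩ ↑l) : Int) := by
  have hcongr : ∀ (acc : Int), ∀ i ∈ (PySem.Dict.counter m).keys,
      (if (PySem.Dict.counter l).contains i then
        acc + (if (PySem.Dict.counter m).getD i 0 < (PySem.Dict.counter l).getD i 0
               then (PySem.Dict.counter m).getD i 0 else (PySem.Dict.counter l).getD i 0)
      else acc)
      = acc + min ((m.count i : Int)) ((l.count i : Int)) := by
    intro acc i _
    by_cases h : (PySem.Dict.counter l).contains i = true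
    · have hl : (0 : Int) < (l.count i : Int) := by
        have hmem : i ∈ l := by
          rw [PySem.Dict.contains_counter] at h
          simpa using h
        exact_mod_cast List.count_pos_iff.mpr hmem
      simp only [h, if_true, PySem.Dict.getD_counter]
      rw [min_def]
      split_ifs <;> omega
    · have hl : l.count i = 0 := by
        have hmem : ¬ i ∈ l := by
          rw [PySem.Dict.contains_counter] at h
          simpa using h
        exact List.count_eq_zero.mpr hmem
      simp [h, hl]
  rw [PySem.List.foldl_congr_mem _ _ _ _ hcongr]
  rw [PySem.List.foldl_add]
  have hnat : ((PySem.Dict.counter m).keys.map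
      (fun i => min (m.count i) (l.count i))).sum
      = Multiset.card ((↑m : Multiset Char) ∩ ↑l) := by
    have hkeys : (PySem.Dict.counter m).keys = PySem.Set.ofList m := PySem.Dict.keys_counter m
    have hnd : ((PySem.Dict.counter m).keys).Nodup := PySem.Dict.nodup_keys_counter m
    have hfin : ((PySem.Dict.counter m).keys).toFinset = (↑m : Multiset Char).toFinset := by
      ext x
      simp [hkeys, PySem.Set.mem_ofList]
    rw [← List.sum_toFinset _ hnd, hfin, card_inter_eq_sum]
    exact Finset.sum_congr rfl (fun a _ => by simp)
  rw [zero_add]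
  have hmap : (PySem.Dict.counter m).keys.map
        (fun i => min ((m.count i : Int)) ((l.count i : Int)))
      = ((PySem.Dict.counter m).keys.map (fun i => min (m.count i) (l.count i))).map
          (fun n : Nat => (n : Int)) := by
    rw [List.map_map]
    exact List.map_congr_left (fun i _ => (Nat.cast_min _ _).symm)
  rw [hmap, ← Nat.cast_list_sum, hnat]

-- B's consuming pass computes the multiset-intersection cardinality.
lemma b_loop_eq (l : List Char) : ∀ (d : PySem.Dict Char Int) (cnt : Int) (r : List Char),
    (∀ c, d.getD c 0 = (r.count c : Int)) →
    (l.foldl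
      (fun (s : PySem.Dict Char Int × Int) ch =>
        if s.1.getD ch 0 > 0 then (s.1.modify ch 0 (· - 1), s.2 + 1) else s)
      (d, cnt)).2
    = cnt + (Multiset.card ((↑r : Multiset Char) ∩ ↑l) : Int) := by
  induction l with
  | nil => intro d cnt r _; simp
  | cons c rest ih =>
    intro d cnt r hinv
    simp only [List.foldl_cons]
    by_cases h : d.getD c 0 > 0
    · have hc : c ∈ r := by
        rw [hinv c] at h
        exact List.count_pos_iff.mp (by exact_mod_cast h)
      have hinv' : ∀ x, (d.modify c 0 (· - 1)).getD x 0 = ((r.erase c).count x : Int) := by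
        intro x
        rw [PySem.Dict.getD_modify]
        by_cases hx : x = c
        · subst hx
          rw [if_pos rfl, hinv x, List.count_erase_self]
          have := List.count_pos_iff.mpr hc
          omega
        · rw [if_neg hx, hinv x, List.count_erase_of_ne hx]
      rw [if_pos h]
      rw [ih _ _ _ hinv']
      have hcard : Multiset.card ((↑r : Multiset Char) ∩ ↑(c :: rest))
          = Multiset.card ((↑(r.erase c) : Multiset Char) ∩ ↑rest) + 1 := by
        rw [Multiset.inter_comm]
        have : ((c :: rest : List Char) : Multiset Char) = c ::ₘ ↑rest := rfl
        rw [this, Multiset.cons_inter_of_pos _ (by simpa using hc), Multiset.card_cons,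
          Multiset.inter_comm, Multiset.coe_erase]
      rw [hcard]
      push_cast
      ring
    · have hc : ¬ c ∈ r := by
        intro hmem
        have := List.count_pos_iff.mpr hmem
        rw [hinv c] at h
        omega
      rw [if_neg h, ih _ _ _ hinv]
      have : ((↑r : Multiset Char) ∩ ↑(c :: rest)) = ((↑r : Multiset Char) ∩ ↑rest) := by
        rw [Multiset.inter_comm]
        have hcons : ((c :: rest : List Char) : Multiset Char) = c ::ₘ ↑rest := rfl
        rw [hcons, Multiset.cons_inter_of_neg _ (by simpa using hc), Multiset.inter_comm]
      rw [this]

-- ===== VERDICT (by name: the statement is the Claim_ definition above) =====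
theorem checkSimilarity_spec : Claim_equal_checkSimilarity := by
  intro oldPassword newPassword _
  unfold Spec_checkSimilarity checkSimilarity checkSimilarity_alt
  by_cases heq : oldPassword == newPassword
  · simp [heq]
  · simp only [heq, if_false, Bool.false_eq_true]
    rw [buildStep_eq, PySem.Dict.foldl_insert_getD_add_one_eq_counter,
      PySem.Dict.foldl_insert_getD_add_one_eq_counter,
      a_sum_eq oldPassword.toList newPassword.toList,
      b_loop_eq newPassword.toList (PySem.Dict.counter oldPassword.toList) 0 oldPassword.toList
        (fun c => PySem.Dict.getD_counter _ _)]
    rw [zero_add]
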